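-- pv_equiv track=rewrite | github.com/rmoskwa/crawl4ai-local-model-embedding | src/utils.py | extract_text_between_code_blocks
-- ===== SOURCE A (Python) =====
-- from typing import List, Dict, Any, Optional, Tuple
--
-- def extract_text_between_code_blocks(
--     markdown_content: str, code_blocks: List[Dict[str, Any]]
-- ) -> str:
--     """
--     Extract all text content that is not within code blocks.
--
--     Args:
--         markdown_content: The original markdown content
--         code_blocks: List of code blocks to exclude
--
--     Returns:
--         Concatenated text content outside of code blocks
--     """
--     if not code_blocks:
--         return markdown_content.strip()
--
--     # Find all code block positions in the original content
--     code_positions = []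
--
--     # Re-find code block positions in original content
--     pos = 0
--     while True:
--         pos = markdown_content.find("```", pos)
--         if pos == -1:
--             break
--
--         # Find the closing backticks
--         end_pos = markdown_content.find("```", pos + 3)
--         if end_pos == -1:
--             break
--
--         code_positions.append((pos, end_pos + 3))
--         pos = end_pos + 3
--
--     # Extract text between code blocks
--     text_segments = []
--     last_end = 0
--
--     for start_pos, end_pos in code_positions:
--         # Add text before this code block
--         if start_pos > last_end:
--             text_segment = markdown_content[last_end:start_pos].strip()
--             if text_segment:
--                 text_segments.append(text_segment)
--         last_end = end_pos
--
--     # Add any remaining text after the last code block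
--     if last_end < len(markdown_content):
--         remaining_text = markdown_content[last_end:].strip()
--         if remaining_text:
--             text_segments.append(remaining_text)
--
--     return "\n\n".join(text_segments)
-- ===== SOURCE B (Python) =====
-- def extract_text_between_code_blocks(markdown_content, code_blocks):
--     if not code_blocks:
--         return markdown_content.strip()
--     # Split on every fence; even-indexed parts are outside text, odd-indexed are
--     # inside a fence pair.  An odd number of fences (even number of parts) leaves
--     # the last fence unpaired: it stays, with what follows, in the outside text.
--     parts = markdown_content.split("```")
--     if len(parts) % 2 == 0:
--         parts = parts[:-2] + [parts[-2] + "```" + parts[-1]]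
--     segments = (p.strip() for p in parts[::2])
--     return "\n\n".join(s for s in segments if s)
-- ===== Notes on version B (the rewrite author's own statement) =====
-- stated objective: idiomatic
-- what changed: Replaces the two-phase find-loop (collect absolute fence-pair positions, then slice with last_end bookkeeping) by a single str.split on the fence, a parity fix that re-attaches an unpaired trailing fence, and keeping the even-indexed parts.
import Mathlib
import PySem

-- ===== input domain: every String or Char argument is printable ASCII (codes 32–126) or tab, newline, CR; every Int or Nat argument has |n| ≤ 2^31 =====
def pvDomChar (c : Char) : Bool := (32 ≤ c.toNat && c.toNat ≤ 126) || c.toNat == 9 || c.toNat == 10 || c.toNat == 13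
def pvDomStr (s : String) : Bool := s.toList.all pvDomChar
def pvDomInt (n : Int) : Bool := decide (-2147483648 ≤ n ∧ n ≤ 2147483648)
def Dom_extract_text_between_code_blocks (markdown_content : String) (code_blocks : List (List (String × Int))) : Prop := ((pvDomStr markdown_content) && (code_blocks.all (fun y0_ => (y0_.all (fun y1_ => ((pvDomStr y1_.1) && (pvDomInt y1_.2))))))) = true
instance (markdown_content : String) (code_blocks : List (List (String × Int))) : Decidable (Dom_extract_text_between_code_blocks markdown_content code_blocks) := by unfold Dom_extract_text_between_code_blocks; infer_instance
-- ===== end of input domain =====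

-- B replaces A's two-phase absolute-position scan (find loop collecting fence pairs, then a
-- slicing loop with last_end bookkeeping) by one split on the fence plus a parity fix; idiomatic, same cost.

-- ===== PORT A =====
-- the fence literal "```" and the separator "\n\n", shared by both ports
def pvFence : List Char := ['`', '`', '`']

def pvNl2 : List Char := ['\n', '\n']

-- A's first while-loop: collect the (start, end) positions of paired fences from `pos` on
-- (the fuel only makes the loop total: it starts at cs.length + 1 and never runs out,
-- since each iteration advances pos by at least 6)
def pvA_scan (cs : List Char) : Nat → Nat → List (Int × Int)
  | 0, _ => []
  | fuel + 1, pos =>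
    let p := PySem.Chars.findFrom cs pvFence pos none
    if p = -1 then []
    else
      let e := PySem.Chars.findFrom cs pvFence (p + 3) none
      if e = -1 then []
      else (p, e + 3) :: pvA_scan cs fuel (e + 3).toNat

-- A's second loop plus the trailing-text step: emit the stripped nonempty segments
def pvA_emit (cs : List Char) : List (Int × Int) → Int → List (List Char) → List (List Char)
  | [], last_end, segs =>
      if last_end < cs.length then
        let r := PySem.Chars.strip (PySem.List.slice cs (some last_end) none)
        if r ≠ [] then segs ++ [r] else segs
      else segs
  | (s, e) :: rest, last_end, segs =>
      pvA_emit cs rest e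
        (if last_end < s then
          let t := PySem.Chars.strip (PySem.List.slice cs (some last_end) (some s))
          if t ≠ [] then segs ++ [t] else segs
        else segs)

def extract_text_between_code_blocks (markdown_content : String) (code_blocks : List (List (String × Int))) : String :=
  if code_blocks.isEmpty then PySem.Str.strip markdown_content
  else
    let cs := markdown_content.toList
    let code_positions := pvA_scan cs (cs.length + 1) 0
    let text_segments := pvA_emit cs code_positions 0 []
    String.ofList (PySem.Chars.join pvNl2 text_segments)

-- ===== PORT B =====
-- parts[:-2] + [parts[-2] + "```" + parts[-1]] when the number of parts is even, else parts unchanged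
def pvMerge (parts : List (List Char)) : List (List Char) :=
  if parts.length % 2 = 0 then
    PySem.List.slice parts none (some (-2)) ++
      [PySem.List.pyGetD parts (-2) [] ++ pvFence ++ PySem.List.pyGetD parts (-1) []]
  else parts

def extract_text_between_code_blocks_alt (markdown_content : String) (code_blocks : List (List (String × Int))) : String :=
  if code_blocks.isEmpty then PySem.Str.strip markdown_content
  else
    let parts := PySem.Chars.splitOn markdown_content.toList pvFence
    let parts2 := pvMerge parts
    let evens := (PySem.List.slice? parts2 none none 2).getD []
    let segments := evens.map PySem.Chars.strip
    String.ofList (PySem.Chars.join pvNl2 (segments.filter (fun s => s ≠ [])))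

-- ===== PRECONDITION & SPEC =====
def Spec_extract_text_between_code_blocks (markdown_content : String) (code_blocks : List (List (String × Int))) (out : String) : Prop := out = extract_text_between_code_blocks_alt markdown_content code_blocks
instance (markdown_content : String) (code_blocks : List (List (String × Int))) (out : String) : Decidable (Spec_extract_text_between_code_blocks markdown_content code_blocks out) := by unfold Spec_extract_text_between_code_blocks; infer_instance

-- ===== CLAIM (what is proved, stated in full; the proofs are below) =====
def Claim_equal_extract_text_between_code_blocks : Prop := ∀ (markdown_content : String) (code_blocks : List (List (String × Int))), Dom_extract_text_between_code_blocks markdown_content code_blocks → Spec_extract_text_between_code_blocks markdown_content code_blocks (extract_text_between_code_blocks markdown_content code_blocks)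

-- ===== LEMMAS AND PROOFS =====
theorem pvGo_shift (sub : List Char) (hne : sub ≠ []) :
    ∀ (l : List Char) (k : Nat),
      PySem.Chars.find.go sub l k =
        if PySem.Chars.find.go sub l 0 = -1 then -1 else PySem.Chars.find.go sub l 0 + k := by
  intro l
  induction l with
  | nil =>
    intro k
    simp [PySem.Chars.find.go, List.isEmpty_iff, hne]
  | cons c t ih =>
    intro k
    rw [PySem.Chars.find.go]
    conv_rhs => rw [PySem.Chars.find.go]
    by_cases hp : sub.isPrefixOf (c :: t)
    · simp [hp]
    · simp only [hp, Bool.false_eq_true, if_false]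
      have hb : -1 ≤ PySem.Chars.find.go sub t 0 := PySem.Chars.neg_one_le_find t sub
      rw [ih (k + 1), ih 1]
      by_cases h0 : PySem.Chars.find.go sub t 0 = -1
      · simp [h0]
      · simp only [h0, if_false]
        rw [if_neg (by omega)]
        push_cast
        omega

theorem pvFind_cons (c : Char) (rest sub : List Char) (hne : sub ≠ []) :
    PySem.Chars.find (c :: rest) sub =
      if sub.isPrefixOf (c :: rest) then 0
      else if PySem.Chars.find rest sub = -1 then -1 else PySem.Chars.find rest sub + 1 := by
  unfold PySem.Chars.find
  rw [PySem.Chars.find.go]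
  by_cases hp : sub.isPrefixOf (c :: rest)
  · simp [hp]
  · simp only [hp, Bool.false_eq_true, if_false]
    rw [pvGo_shift sub hne rest 1]
    have hb : -1 ≤ PySem.Chars.find.go sub rest 0 := PySem.Chars.neg_one_le_find rest sub
    by_cases h0 : PySem.Chars.find.go sub rest 0 = -1
    · simp [h0]
    · simp only [h0, if_false]
      push_cast
      ring

theorem pvPrefixDrop_bound (cs sub : List Char) (k : Nat) (hs : sub.length = 3)
    (h : sub <+: cs.drop k) : k + 3 ≤ cs.length ∨ sub = [] := by
  left
  have h1 := h.length_le
  rw [List.length_drop] at h1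
  by_cases hk : k ≤ cs.length
  · omega
  · exfalso
    rw [List.drop_eq_nil_of_le (by omega)] at h
    have := h.length_le
    simp at this
    omega

theorem pvFind_nonneg_bound (cs : List Char) (h : PySem.Chars.find cs pvFence ≠ -1) :
    (PySem.Chars.find cs pvFence).toNat + 3 ≤ cs.length ∧ 0 ≤ PySem.Chars.find cs pvFence ∧
      pvFence <+: cs.drop (PySem.Chars.find cs pvFence).toNat := by
  have n1 := PySem.Chars.neg_one_le_find cs pvFence
  have s1 := (PySem.Chars.find_spec (s := cs) (sub := pvFence) (by omega)).1
  have b1 := pvPrefixDrop_bound cs pvFence _ (by decide) s1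
  rcases b1 with b1 | b1
  · exact ⟨b1, by omega, s1⟩
  · exact absurd b1 (by decide)

def pvS (cs : List Char) : List (List Char) :=
  let i := PySem.Chars.find cs pvFence
  if hi : i = -1 then [cs]
  else cs.take i.toNat :: pvS (cs.drop (i.toNat + 3))
  termination_by cs.length
  decreasing_by
    simp only [i] at hi
    have := pvFind_nonneg_bound cs hi
    simp only [List.length_drop]
    omega

theorem pvS_ne_nil (cs : List Char) : pvS cs ≠ [] := by
  rw [pvS]
  split <;> simp

def pvR (cs : List Char) : List (List Char) :=
  let i := PySem.Chars.find cs pvFence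
  if hi : i = -1 then [cs]
  else
    let j := PySem.Chars.find (cs.drop (i.toNat + 3)) pvFence
    if hj : j = -1 then [cs]
    else cs.take i.toNat :: pvR (cs.drop (i.toNat + 3 + j.toNat + 3))
  termination_by cs.length
  decreasing_by
    simp only [i, j] at hi hj
    have n1 := PySem.Chars.neg_one_le_find cs pvFence
    have n2 := PySem.Chars.neg_one_le_find (cs.drop ((PySem.Chars.find cs pvFence).toNat + 3)) pvFence
    have s1 := (PySem.Chars.find_spec (s := cs) (sub := pvFence) (by omega)).1
    have s2 := (PySem.Chars.find_spec (s := cs.drop ((PySem.Chars.find cs pvFence).toNat + 3)) (sub := pvFence) (by omega)).1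
    rw [List.drop_drop] at s2
    have b1 := pvPrefixDrop_bound cs pvFence _ (by decide) s1
    have b2 := pvPrefixDrop_bound cs pvFence _ (by decide) s2
    rcases b1 with b1 | b1
    · rcases b2 with b2 | b2
      · simp only [List.length_drop]
        omega
      · exact absurd b2 (by decide)
    · exact absurd b1 (by decide)

def pvPrep (p : List Char) : List (List Char) → List (List Char)
  | [] => [p]
  | h :: t => (p ++ h) :: t

theorem pvGoSplit : ∀ (fuel : Nat) (l cur : List Char) (acc : List (List Char)),
    l.length ≤ fuel →
    PySem.Chars.splitOn.go pvFence fuel l cur acc = acc.reverse ++ pvPrep cur.reverse (pvS l) := by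
  intro fuel
  induction fuel with
  | zero =>
    intro l cur acc hl
    have : l = [] := by simpa using List.length_eq_zero_iff.mp (by omega)
    subst this
    rw [PySem.Chars.splitOn.go, pvS]
    simp [pvPrep, show PySem.Chars.find [] pvFence = -1 from by decide]
  | succ fuel ih =>
    intro l cur acc hl
    match l with
    | [] =>
      rw [PySem.Chars.splitOn.go, pvS]
      · simp [pvPrep, show PySem.Chars.find [] pvFence = -1 from by decide]
      · omega
    | c :: rest =>
      have hlen : pvFence.length = 3 := by decide
      rw [PySem.Chars.splitOn.go]
      by_cases hp : pvFence.isPrefixOf (c :: rest)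
      · rw [if_pos hp, hlen]
        rw [ih _ _ _ (by simp only [List.length_drop, List.length_cons] at hl ⊢; omega)]
        have hfind : PySem.Chars.find (c :: rest) pvFence = 0 := by
          rw [pvFind_cons _ _ _ (by decide), if_pos hp]
        conv_rhs => rw [pvS]
        simp only [hfind]
        rw [dif_neg (by omega)]
        have hnn := pvS_ne_nil (List.drop 3 (c :: rest))
        simp only [Int.toNat_zero, List.take_zero, Nat.zero_add]
        match hS : pvS (List.drop 3 (c :: rest)) with
        | [] => exact absurd hS hnn
        | h :: t =>
          simp [pvPrep, hS]
      · rw [if_neg hp]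
        rw [ih _ _ _ (by simp only [List.length_cons] at hl; omega)]
        have hfind := pvFind_cons c rest pvFence (by decide)
        rw [if_neg hp] at hfind
        conv_rhs => rw [pvS]
        by_cases h0 : PySem.Chars.find rest pvFence = -1
        · rw [dif_pos (by rw [hfind]; simp [h0])]
          rw [pvS, dif_pos h0]
          simp [pvPrep]
        · have hb := pvFind_nonneg_bound rest h0
          rw [dif_neg (by rw [hfind]; simp only [h0, if_false]; omega)]
          conv_lhs => rw [pvS]
          rw [dif_neg h0]
          simp only [hfind, h0, if_false]
          have ht : ((PySem.Chars.find rest pvFence + 1).toNat) = (PySem.Chars.find rest pvFence).toNat + 1 := by omega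
          simp only [ht, List.take_succ_cons, List.drop_succ_cons, pvPrep]
          simp

theorem pvSplitOn_eq_S (cs : List Char) : PySem.Chars.splitOn cs pvFence = pvS cs := by
  unfold PySem.Chars.splitOn
  rw [pvGoSplit _ _ _ _ (by omega)]
  match h : pvS cs with
  | [] => exact absurd h (pvS_ne_nil cs)
  | a :: t => simp [pvPrep]

def pvEvens {α : Type} : List α → List α
  | [] => []
  | [a] => [a]
  | a :: _ :: l => a :: pvEvens l

theorem pvAppendTwo {α : Type} (l : List α) (h : 2 ≤ l.length) :
    ∃ (t : List α) (x y : α), l = t ++ [x, y] := by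
  match hr : l.reverse with
  | [] => rw [← l.reverse_reverse, hr] at h; simp at h
  | [y] => rw [← l.reverse_reverse, hr] at h; simp at h
  | y :: x :: t =>
    exact ⟨t.reverse, x, y, by rw [← l.reverse_reverse, hr]; simp⟩

theorem pvGetD_neg2 {α : Type} (xs : List α) (x y : α) (d : α) :
    PySem.List.pyGetD (xs ++ [x, y]) (-2) d = x := by
  rw [PySem.List.pyGetD_neg_ofNat (xs ++ [x, y]) 2 d (by omega) (by simp)]
  simp

theorem pvGetD_neg1 {α : Type} (xs : List α) (x y : α) (d : α) :
    PySem.List.pyGetD (xs ++ [x, y]) (-1) d = y := by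
  rw [show xs ++ [x, y] = (xs ++ [x]) ++ [y] by simp]
  exact PySem.List.pyGetD_neg_one_append_singleton _ _ _

theorem pvMerge_eq (t : List (List Char)) (x y : List Char)
    (he : (t ++ [x, y]).length % 2 = 0) :
    pvMerge (t ++ [x, y]) = t ++ [x ++ pvFence ++ y] := by
  unfold pvMerge
  rw [if_pos he]
  rw [PySem.List.slice_to_neg_ofNat _ 2 (by omega)]
  rw [pvGetD_neg2, pvGetD_neg1]
  congr 1
  rw [show (t ++ [x, y]).length - 2 = t.length by simp]
  exact List.take_left' rfl

theorem pvMerge_cons₂ (a b : List Char) (l : List (List Char)) (hl : l ≠ []) :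
    pvMerge (a :: b :: l) = a :: b :: pvMerge l := by
  by_cases he : l.length % 2 = 0
  · have h2 : 2 ≤ l.length := by
      rcases l with _ | ⟨u, l'⟩
      · exact absurd rfl hl
      · rcases l' with _ | _
        · simp at he
        · simp
    obtain ⟨t, x, y, rfl⟩ := pvAppendTwo l h2
    rw [show a :: b :: (t ++ [x, y]) = (a :: b :: t) ++ [x, y] by simp]
    rw [pvMerge_eq _ _ _ (by simp at he ⊢; omega), pvMerge_eq _ _ _ he]
    simp
  · unfold pvMerge
    rw [if_neg (by simp; omega), if_neg he]

theorem pvFence_decomp (cs : List Char) (hi : PySem.Chars.find cs pvFence ≠ -1) :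
    List.take (PySem.Chars.find cs pvFence).toNat cs ++ pvFence ++
      List.drop ((PySem.Chars.find cs pvFence).toNat + 3) cs = cs := by
  obtain ⟨hb, _, hpre⟩ := pvFind_nonneg_bound cs hi
  obtain ⟨u, hu⟩ := hpre
  have h3 : List.drop ((PySem.Chars.find cs pvFence).toNat + 3) cs = u := by
    rw [← List.drop_drop, ← hu]
    simp [pvFence]
  rw [h3, List.append_assoc, hu, List.take_append_drop]

theorem pvB_eq_R (cs : List Char) : pvEvens (pvMerge (pvS cs)) = pvR cs := by
  induction cs using pvR.induct with
  | case1 cs i hi =>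
    simp only [i] at hi
    rw [pvS, dif_pos hi, pvR, dif_pos hi]
    rfl
  | case2 cs i hi j hj =>
    simp only [i] at hi
    simp only [j, i] at hj
    rw [pvR, dif_neg hi, dif_pos hj]
    rw [pvS, dif_neg hi]
    conv_lhs => rw [pvS, dif_pos hj]
    rw [show ∀ (a b : List Char), [a, b] = [] ++ [a, b] from fun a b => rfl]
    rw [pvMerge_eq [] _ _ (by simp)]
    simp only [List.nil_append]
    show [_] = [cs]
    rw [pvFence_decomp cs hi]
  | case3 cs i hi j hj ih =>
    simp only [i] at hi
    simp only [j, i] at hj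
    simp only [j, i] at ih
    rw [pvR, dif_neg hi, dif_neg hj]
    rw [pvS, dif_neg hi]
    conv_lhs => rw [pvS, dif_neg hj]
    rw [pvMerge_cons₂ _ _ _ (pvS_ne_nil _)]
    show _ :: pvEvens (pvMerge (pvS _)) = _
    rw [List.drop_drop]
    rw [show (PySem.Chars.find cs pvFence).toNat + 3 +
          ((PySem.Chars.find (List.drop ((PySem.Chars.find cs pvFence).toNat + 3) cs) pvFence).toNat + 3) =
        (PySem.Chars.find cs pvFence).toNat + 3 +
          (PySem.Chars.find (List.drop ((PySem.Chars.find cs pvFence).toNat + 3) cs) pvFence).toNat + 3 from by omega]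
    rw [ih]

theorem pvFilterMap_two {α : Type} : ∀ (l : List α),
    List.filterMap (fun k => l[2 * k]?) (List.range ((l.length + 1) / 2)) = pvEvens l := by
  intro l
  induction l using pvEvens.induct with
  | case1 => simp [pvEvens]
  | case2 a => simp [pvEvens]
  | case3 a b t ih =>
    have hlen : ((a :: b :: t).length + 1) / 2 = (t.length + 1) / 2 + 1 := by
      simp only [List.length_cons]; omega
    rw [hlen, List.range_succ_eq_map]
    rw [List.filterMap_cons]
    simp only [Nat.mul_zero, List.getElem?_cons_zero]
    rw [List.filterMap_map]
    have : (fun k => (a :: b :: t)[2 * k]?) ∘ Nat.succ = fun k => t[2 * k]? := by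
      funext k
      simp only [Function.comp]
      rw [show 2 * k.succ = 2 * k + 1 + 1 by omega]
      simp
    rw [this, ih]
    rfl

theorem pvSlice2 {α : Type} (l : List α) :
    (PySem.List.slice? l none none 2).getD [] = pvEvens l := by
  rw [← pvFilterMap_two]
  unfold PySem.List.slice? PySem.List.sliceIndices
  norm_num
  have h1 : (if 0 < l.length then (((l.length : Int) + 2 - 1) / 2).toNat else 0) = (l.length + 1) / 2 := by
    split <;> omega
  rw [h1]
  have h2 : (fun x : Nat => l[(2 * (x : Int)).toNat]?) = fun k : Nat => l[2 * k]? := by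
    funext x
    have : ((2 : Int) * (x : Int)).toNat = 2 * x := by omega
    rw [this]
  rw [h2]

def pvStripFilter (xs : List (List Char)) : List (List Char) :=
  (xs.map PySem.Chars.strip).filter (fun s => s ≠ [])

theorem pvStripFilter_cons (a : List Char) (l : List (List Char)) :
    pvStripFilter (a :: l) =
      (if PySem.Chars.strip a ≠ [] then [PySem.Chars.strip a] else []) ++ pvStripFilter l := by
  unfold pvStripFilter
  simp only [List.map_cons, List.filter_cons]
  split_ifs with h1 h2 h3 <;> simp_all

theorem pvStrip_nil : PySem.Chars.strip [] = [] := by rfl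

theorem pvA_emit_nil_eq (cs : List Char) (ℓ : Nat) (segs : List (List Char)) (hℓ : ℓ ≤ cs.length) :
    pvA_emit cs [] (↑ℓ) segs = segs ++ pvStripFilter [cs.drop ℓ] := by
  rw [pvA_emit]
  by_cases h : ℓ < cs.length
  · rw [if_pos (by exact_mod_cast h)]
    rw [PySem.List.slice_from_natCast]
    rw [pvStripFilter_cons]
    simp only [pvStripFilter, List.map_nil, List.filter_nil]
    split_ifs <;> simp
  · have : ℓ = cs.length := by omega
    subst this
    rw [if_neg (by exact_mod_cast h)]
    rw [List.drop_length]
    simp [pvStripFilter, pvStrip_nil]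

theorem pvA_main : ∀ (n : Nat) (cs : List Char) (ℓ : Nat) (segs : List (List Char)),
    cs.length - ℓ < n → ℓ ≤ cs.length →
    pvA_emit cs (pvA_scan cs n ℓ) (↑ℓ) segs = segs ++ pvStripFilter (pvR (cs.drop ℓ)) := by
  intro n
  induction n with
  | zero =>
    intro cs ℓ segs hn hℓ
    exact absurd hn (by omega)
  | succ n ih =>
    intro cs ℓ segs hn hℓ
    have hff := PySem.Chars.findFrom_natCast cs pvFence ℓ hℓ
    rw [pvA_scan]
    by_cases hi : PySem.Chars.find (cs.drop ℓ) pvFence = -1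
    · rw [if_pos (by rw [hff, if_pos hi])]
      rw [pvA_emit_nil_eq cs ℓ segs hℓ]
      rw [pvR, dif_pos hi]
    · obtain ⟨hbound, hipos, hpre⟩ := pvFind_nonneg_bound (cs.drop ℓ) hi
      rw [List.length_drop] at hbound
      set i := PySem.Chars.find (cs.drop ℓ) pvFence with hidef
      have hp1 : PySem.Chars.findFrom cs pvFence (↑ℓ) none = ↑ℓ + i := by rw [hff, if_neg hi]
      rw [if_neg (by rw [hp1]; omega)]
      have hcast : PySem.Chars.findFrom cs pvFence (↑ℓ) none + 3 = ((ℓ + i.toNat + 3 : Nat) : Int) := by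
        rw [hp1]; push_cast; omega
      have hk2 : ℓ + i.toNat + 3 ≤ cs.length := by omega
      have hff2 := PySem.Chars.findFrom_natCast cs pvFence (ℓ + i.toNat + 3) hk2
      have hdd : cs.drop (ℓ + i.toNat + 3) = (cs.drop ℓ).drop (i.toNat + 3) := by
        conv_rhs => rw [List.drop_drop]
        congr 1
      by_cases hj : PySem.Chars.find ((cs.drop ℓ).drop (i.toNat + 3)) pvFence = -1
      · rw [if_pos (by rw [hcast, hff2, hdd, if_pos hj])]
        rw [pvA_emit_nil_eq cs ℓ segs hℓ]
        rw [pvR, dif_neg hi, dif_pos hj]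
      · obtain ⟨hbound2, hjpos, _⟩ := pvFind_nonneg_bound ((cs.drop ℓ).drop (i.toNat + 3)) hj
        rw [List.length_drop, List.length_drop] at hbound2
        set j := PySem.Chars.find ((cs.drop ℓ).drop (i.toNat + 3)) pvFence with hjdef
        have he1 : PySem.Chars.findFrom cs pvFence (PySem.Chars.findFrom cs pvFence (↑ℓ) none + 3) none
            = ((ℓ + i.toNat + 3 : Nat) : Int) + j := by
          rw [hcast, hff2, hdd, if_neg hj]
        rw [if_neg (by rw [he1]; push_cast; omega)]
        rw [pvA_emit]
        have hslice : (if (↑ℓ : Int) < PySem.Chars.findFrom cs pvFence (↑ℓ) none then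
            let t := PySem.Chars.strip (PySem.List.slice cs (some ↑ℓ) (some (PySem.Chars.findFrom cs pvFence (↑ℓ) none)))
            if t ≠ [] then segs ++ [t] else segs
          else segs) = segs ++ pvStripFilter [(cs.drop ℓ).take i.toNat] := by
          rw [hp1, show (↑ℓ + i : Int) = ((ℓ + i.toNat : Nat) : Int) by push_cast; omega,
              PySem.List.slice_natCast]
          have htake : (cs.drop ℓ).take i.toNat = List.take (ℓ + i.toNat - ℓ) (List.drop ℓ cs) := by
            congr 1; omega
          rw [← htake, pvStripFilter_cons]
          simp only [pvStripFilter, List.map_nil, List.filter_nil, List.append_nil]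
          by_cases h0 : 0 < i
          · rw [if_pos (by push_cast; omega)]
            split_ifs <;> simp_all
          · have hz : i = 0 := by omega
            rw [if_neg (by omega)]
            simp [hz, pvStrip_nil]
        rw [hslice]
        have hnext : (PySem.Chars.findFrom cs pvFence (PySem.Chars.findFrom cs pvFence (↑ℓ) none + 3) none + 3)
            = ((ℓ + i.toNat + 3 + j.toNat + 3 : Nat) : Int) := by
          rw [he1]; push_cast; omega
        rw [hnext, Int.toNat_natCast]
        rw [ih cs (ℓ + i.toNat + 3 + j.toNat + 3) _ (by omega) (by omega)]
        conv_rhs => rw [pvR, dif_neg hi, dif_neg hj]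
        rw [← hidef, ← hjdef]
        have hdd2 : cs.drop (ℓ + i.toNat + 3 + j.toNat + 3)
            = (cs.drop ℓ).drop (i.toNat + 3 + j.toNat + 3) := by
          conv_rhs => rw [List.drop_drop]
          congr 1
          omega
        rw [hdd2]
        conv_rhs => rw [pvStripFilter_cons]
        rw [pvStripFilter_cons]
        simp only [pvStripFilter, List.map_nil, List.filter_nil, List.append_nil]
        rw [List.append_assoc]

-- ===== VERDICT (by name: the statement is the Claim_ definition above) =====
theorem extract_text_between_code_blocks_spec : Claim_equal_extract_text_between_code_blocks := by
  intro m cb _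
  unfold Spec_extract_text_between_code_blocks
  unfold extract_text_between_code_blocks extract_text_between_code_blocks_alt
  by_cases h : cb.isEmpty
  · simp only [h, if_true]
  · simp only [h, Bool.false_eq_true, if_false]
    have hA := pvA_main (m.toList.length + 1) m.toList 0 [] (by omega) (by omega)
    simp only [Nat.cast_zero, List.drop_zero, List.nil_append] at hA
    rw [hA]
    rw [pvSlice2, pvSplitOn_eq_S, pvB_eq_R]
    rfl
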